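-- pv_equiv track=rewrite | github.com/xenophobed/isA_MCP | tools/services/data_analytics_service/processors/data_processors/model/unsupervised_processor.py | _find_consensus_anomalies
-- ===== SOURCE A (Python) =====
-- from typing import Dict, List, Any, Optional, Tuple, Union
--
-- def _find_consensus_anomalies(all_anomalies: Dict[str, set]) -> List[int]:
--     """Find anomalies detected by multiple methods"""
--     if len(all_anomalies) < 2:
--         return []
--
--     # Find intersection of anomalies detected by at least 2 methods
--     consensus = set()
--     methods = list(all_anomalies.keys())
--
--     for i in range(len(methods)):
--         for j in range(i + 1, len(methods)):
--             consensus.update(all_anomalies[methods[i]] & all_anomalies[methods[j]])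
--
--     return sorted(list(consensus))
-- ===== SOURCE B (Python) =====
-- from typing import Dict, List
--
-- def _find_consensus_anomalies(all_anomalies: Dict[str, set]) -> List[int]:
--     """Find anomalies detected by multiple methods (count-table formulation)."""
--     if len(all_anomalies) < 2:
--         return []
--     counts = {}
--     for s in all_anomalies.values():
--         for idx in s:
--             counts[idx] = counts.get(idx, 0) + 1
--     return sorted(idx for idx, c in counts.items() if c >= 2)
-- ===== Notes on version B (the rewrite author's own statement) =====
-- stated objective: simpler
-- what changed: Replaced the O(m^2) nested pairwise set-intersection loops by a single linear pass that builds a frequency table counting how many methods flag each index, then returns the sorted indices with count >= 2 (valid because each method's set holds distinct indices).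
import Mathlib
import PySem

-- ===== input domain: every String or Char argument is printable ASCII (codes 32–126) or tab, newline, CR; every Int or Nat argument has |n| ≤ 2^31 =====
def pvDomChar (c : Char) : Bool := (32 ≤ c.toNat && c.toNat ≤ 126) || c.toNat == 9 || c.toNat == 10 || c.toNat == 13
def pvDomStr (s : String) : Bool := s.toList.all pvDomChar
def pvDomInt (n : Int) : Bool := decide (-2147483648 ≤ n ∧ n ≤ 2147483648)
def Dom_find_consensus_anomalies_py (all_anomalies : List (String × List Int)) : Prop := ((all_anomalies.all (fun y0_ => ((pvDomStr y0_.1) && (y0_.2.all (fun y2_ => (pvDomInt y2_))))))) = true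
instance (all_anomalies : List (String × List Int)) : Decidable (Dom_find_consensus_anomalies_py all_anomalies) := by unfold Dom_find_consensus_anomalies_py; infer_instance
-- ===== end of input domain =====

-- B replaces A's nested pairwise set-intersection loops by one linear counting pass over all
-- sets plus a filter of the count table (objective: simpler single-pass algorithm).

-- ===== PORT A =====
-- Literal port of A: guard, pairwise loops over range(len(methods)) × range(i+1, len(methods)),
-- consensus.update(set_i & set_j), then sorted(list(consensus)).
-- 'all_anomalies[methods[i]]' is a dict lookup whose key always comes from the dict's own keys,
-- so the lookup never raises; it is ported as Dict.getD with default [] (never used).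
def find_consensus_anomalies_py (all_anomalies : List (String × List Int)) : List Int :=
  if PySem.List.len all_anomalies < 2 then []
  else
    let d := PySem.Dict.mk all_anomalies
    let methods := d.keys
    let n := PySem.List.len methods
    let consensus : PySem.Set Int :=
      (PySem.List.pyRange 0 n 1).foldl (fun c i =>
        (PySem.List.pyRange (i + 1) n 1).foldl (fun c j =>
          PySem.Set.update c
            (PySem.Set.inter (d.getD (PySem.List.pyGetD methods i "") [])
                             (d.getD (PySem.List.pyGetD methods j "") []))) c)
        PySem.Set.empty
    PySem.List.sorted consensus (fun x => x) false

-- ===== PORT B =====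
-- Literal port of B: guard, one pass building counts[idx] = counts.get(idx, 0) + 1 over all
-- value sets, then sorted([idx for idx, c in counts.items() if c >= 2]).
def find_consensus_anomalies_py_alt (all_anomalies : List (String × List Int)) : List Int :=
  if PySem.List.len all_anomalies < 2 then []
  else
    let counts : PySem.Dict Int Int :=
      all_anomalies.foldl (fun d p =>
        p.2.foldl (fun d idx => d.insert idx (d.getD idx 0 + 1)) d) PySem.Dict.empty
    PySem.List.sorted ((counts.items.filter (fun kc => decide (2 ≤ kc.2))).map Prod.fst)
      (fun x => x) false

-- ===== PRECONDITION & SPEC =====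
-- Pre_ only restricts the Lean encoding to the canonical images of A's Python inputs: the
-- argument is a dict (distinct keys) of sets (distinct elements), so the assoc list has
-- Nodup keys and each value list is Nodup.  No input representable as a Python dict of sets
-- is excluded.
def Pre_find_consensus_anomalies_py (all_anomalies : List (String × List Int)) : Prop :=
  (all_anomalies.map Prod.fst).Nodup ∧ ∀ p ∈ all_anomalies, p.2.Nodup
instance (all_anomalies : List (String × List Int)) : Decidable (Pre_find_consensus_anomalies_py all_anomalies) := by unfold Pre_find_consensus_anomalies_py; infer_instance

def pvWitness_find_consensus_anomalies_py : (List (String × List Int)) :=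
  [("iso", [1, 2, 5]), ("lof", [2, 3]), ("zscore", [5])]

def Spec_find_consensus_anomalies_py (all_anomalies : List (String × List Int)) (out : List Int) : Prop := out = find_consensus_anomalies_py_alt all_anomalies
instance (all_anomalies : List (String × List Int)) (out : List Int) : Decidable (Spec_find_consensus_anomalies_py all_anomalies out) := by unfold Spec_find_consensus_anomalies_py; infer_instance

-- ===== CLAIM (what is proved, stated in full; the proofs are below) =====
def Claim_equal_find_consensus_anomalies_py : Prop := ∀ (all_anomalies : List (String × List Int)), Dom_find_consensus_anomalies_py all_anomalies → Pre_find_consensus_anomalies_py all_anomalies → Spec_find_consensus_anomalies_py all_anomalies (find_consensus_anomalies_py all_anomalies)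

-- ===== LEMMAS AND PROOFS =====

-- Membership through any foldl whose step adds exactly the elements satisfying P i.
theorem pv_mem_foldl_step {α β : Type} (x : α) (step : List α → β → List α) (P : β → Prop)
    (h : ∀ c i, x ∈ step c i ↔ x ∈ c ∨ P i) :
    ∀ (l : List β) (c0 : List α), x ∈ l.foldl step c0 ↔ x ∈ c0 ∨ ∃ i ∈ l, P i := by
  intro l
  induction l with
  | nil => simp
  | cons b l ih =>
    intro c0
    simp only [List.foldl_cons, ih, h, List.mem_cons]
    constructor
    · rintro ((hx | hp) | ⟨i, hi, hp⟩)
      · exact Or.inl hx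
      · exact Or.inr ⟨b, Or.inl rfl, hp⟩
      · exact Or.inr ⟨i, Or.inr hi, hp⟩
    · rintro (hx | ⟨i, (rfl | hi), hp⟩)
      · exact Or.inl (Or.inl hx)
      · exact Or.inl (Or.inr hp)
      · exact Or.inr ⟨i, hi, hp⟩

-- Nodup is preserved by any foldl whose step preserves it.
theorem pv_nodup_foldl {α β : Type} (step : List α → β → List α)
    (h : ∀ c i, c.Nodup → (step c i).Nodup) :
    ∀ (l : List β) (c0 : List α), c0.Nodup → (l.foldl step c0).Nodup := by
  intro l
  induction l with
  | nil => exact fun _ h0 => h0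
  | cons b l ih => intro c0 h0; exact ih _ (h _ _ h0)

-- Two positions i < j with property P exist iff at least two elements satisfy P.
theorem pv_two_le_countP_iff {α : Type} (dflt : α) (P : α → Bool) :
    ∀ (l : List α),
      (∃ i j : Nat, i < j ∧ j < l.length ∧ P (l.getD i dflt) ∧ P (l.getD j dflt))
        ↔ 2 ≤ l.countP P := by
  intro l
  induction l with
  | nil => simp
  | cons a l ih =>
    simp only [List.countP_cons, List.length_cons]
    constructor
    · rintro ⟨i, j, hij, hj, hpi, hpj⟩
      obtain ⟨j', rfl⟩ : ∃ j', j = j' + 1 := ⟨j - 1, by omega⟩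
      have hj' : j' < l.length := by omega
      simp only [List.getD_cons_succ] at hpj
      rcases Nat.eq_zero_or_pos i with rfl | hi
      · simp only [List.getD_cons_zero] at hpi
        have hmem : l.getD j' dflt ∈ l := by
          rw [List.getD_eq_getElem l dflt hj']; exact List.getElem_mem _
        have h1 : 0 < l.countP P := List.countP_pos_iff.2 ⟨_, hmem, hpj⟩
        simp only [hpi, if_pos]
        omega
      · obtain ⟨i', rfl⟩ : ∃ i', i = i' + 1 := ⟨i - 1, by omega⟩
        simp only [List.getD_cons_succ] at hpi
        have h2 : 2 ≤ l.countP P := ih.1 ⟨i', j', by omega, hj', hpi, hpj⟩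
        split <;> omega
    · intro h2
      by_cases ha : P a = true
      · have h1 : 0 < l.countP P := by simp only [ha, if_pos] at h2; omega
        obtain ⟨b, hb, hpb⟩ := List.countP_pos_iff.1 h1
        obtain ⟨j', hj', rfl⟩ := List.mem_iff_getElem.1 hb
        refine ⟨0, j' + 1, by omega, by omega, by simpa using ha, ?_⟩
        simp only [List.getD_cons_succ]
        rw [List.getD_eq_getElem l dflt hj']
        exact hpb
      · have h2' : 2 ≤ l.countP P := by simp [ha] at h2; omega
        obtain ⟨i, j, hij, hj, hpi, hpj⟩ := ih.2 h2'
        exact ⟨i + 1, j + 1, by omega, by omega, by simpa using hpi, by simpa using hpj⟩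

-- The nested counting loop of B is the straight counting loop over the concatenation.
theorem pv_counts_eq_flat :
    ∀ (l : List (String × List Int)) (d0 : PySem.Dict Int Int),
      l.foldl (fun d p => p.2.foldl (fun d idx => d.insert idx (d.getD idx 0 + 1)) d) d0
        = (l.flatMap Prod.snd).foldl (fun d idx => d.insert idx (d.getD idx 0 + 1)) d0 := by
  intro l
  induction l with
  | nil => simp
  | cons a l ih => intro d0; simp [List.flatMap_cons, List.foldl_append, ih]

-- With Nodup value lists, the total multiplicity of x across all values counts the
-- entries whose value list contains x.
theorem pv_count_flatMap {x : Int} :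
    ∀ (l : List (String × List Int)), (∀ p ∈ l, p.2.Nodup) →
      (l.flatMap Prod.snd).count x = l.countP (fun p => decide (x ∈ p.2)) := by
  intro l
  induction l with
  | nil => simp
  | cons a l ih =>
    intro hnd
    have ha : a.2.Nodup := hnd a (by simp)
    have hl : ∀ p ∈ l, p.2.Nodup := fun p hp => hnd p (by simp [hp])
    simp only [List.flatMap_cons, List.count_append, List.countP_cons, ih hl]
    by_cases hx : x ∈ a.2
    · rw [List.count_eq_one_of_mem ha hx]; simp only [hx, decide_true, if_pos]; omega
    · rw [List.count_eq_zero_of_not_mem hx]; simp [hx]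

-- A's value lookup at loop index i (proof-side names for A's let-bound values).
def pvV (L : List (String × List Int)) (i : Int) : List Int :=
  (PySem.Dict.mk L).getD (PySem.List.pyGetD (PySem.Dict.mk L).keys i "") []

def pvConsA (L : List (String × List Int)) : PySem.Set Int :=
  (PySem.List.pyRange 0 (PySem.List.len (PySem.Dict.mk L).keys) 1).foldl
    (fun c i => (PySem.List.pyRange (i + 1) (PySem.List.len (PySem.Dict.mk L).keys) 1).foldl
      (fun c j => PySem.Set.update c (PySem.Set.inter (pvV L i) (pvV L j))) c)
    PySem.Set.empty

-- Under Nodup keys, the dict value looked up by A at position i is the i-th value list.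
theorem pv_lookup_at (L : List (String × List Int)) (hk : (L.map Prod.fst).Nodup)
    (i : Int) (h0 : 0 ≤ i) (hi : i < (L.length : Int)) :
    pvV L i = (L.getD i.toNat (default : String × List Int)).2 := by
  unfold pvV
  have hkeys : (PySem.Dict.mk L).keys = L.map Prod.fst := by
    simp [PySem.Dict.keys]
  have hlen : i.toNat < L.length := by omega
  have hget : PySem.List.pyGetD (L.map Prod.fst) i "" = (L.getD i.toNat default).1 := by
    rw [PySem.List.pyGetD_eq_getElem (L.map Prod.fst) "" h0 (by simpa using hi)]
    rw [List.getElem_map, List.getD_eq_getElem L default hlen]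
  rw [hkeys, hget]
  have hmemL : L.getD i.toNat default ∈ L := by
    rw [List.getD_eq_getElem L default hlen]; exact List.getElem_mem _
  have hmem : ((L.getD i.toNat default).1, (L.getD i.toNat default).2)
      ∈ (PySem.Dict.mk L).items := by simpa using hmemL
  exact PySem.Dict.getD_of_mem_items _ hmem (by simpa [PySem.Dict.keys] using hk) []

-- Membership in A's consensus set: some pair of loop positions i < j both contain x.
theorem pv_mem_consA (L : List (String × List Int)) (x : Int) :
    x ∈ pvConsA L ↔
      ∃ i ∈ PySem.List.pyRange 0 (PySem.List.len (PySem.Dict.mk L).keys) 1,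
        ∃ j ∈ PySem.List.pyRange (i + 1) (PySem.List.len (PySem.Dict.mk L).keys) 1,
          x ∈ pvV L i ∧ x ∈ pvV L j := by
  unfold pvConsA
  rw [pv_mem_foldl_step x _
      (fun i => ∃ j ∈ PySem.List.pyRange (i + 1) (PySem.List.len (PySem.Dict.mk L).keys) 1,
        x ∈ pvV L i ∧ x ∈ pvV L j)
      (fun c i => pv_mem_foldl_step x _ (fun j => x ∈ pvV L i ∧ x ∈ pvV L j)
        (fun c j => by rw [PySem.Set.mem_update, PySem.Set.mem_inter]) _ c) _ _]
  simp [PySem.Set.empty]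

theorem pv_nodup_consA (L : List (String × List Int)) : (pvConsA L).Nodup := by
  unfold pvConsA
  refine pv_nodup_foldl _ (fun c i hc => ?_) _ _ (by simp [PySem.Set.empty])
  exact pv_nodup_foldl _ (fun c j hcj => PySem.Set.nodup_update _ _ hcj) _ _ hc

-- A's consensus membership, in counting form.
theorem pv_consA_iff (L : List (String × List Int)) (hk : (L.map Prod.fst).Nodup) (x : Int) :
    x ∈ pvConsA L ↔ 2 ≤ L.countP (fun p => decide (x ∈ p.2)) := by
  have hnk : ((PySem.Dict.mk L).keys).length = L.length := by
    simp [PySem.Dict.keys]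
  rw [pv_mem_consA, ← pv_two_le_countP_iff (default : String × List Int)]
  constructor
  · rintro ⟨i, hi, j, hj, hxi, hxj⟩
    rw [PySem.List.mem_pyRange_one] at hi hj
    simp only [PySem.List.len_eq, hnk] at hi hj
    have h0i : (0 : Int) ≤ i := hi.1
    have hjL : j < (L.length : Int) := hj.2
    have hiL : i < (L.length : Int) := by omega
    refine ⟨i.toNat, j.toNat, by omega, by omega, ?_, ?_⟩
    · rw [pv_lookup_at L hk i h0i hiL] at hxi
      exact decide_eq_true hxi
    · rw [pv_lookup_at L hk j (by omega) hjL] at hxj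
      exact decide_eq_true hxj
  · rintro ⟨i, j, hij, hjL, hpi, hpj⟩
    refine ⟨(i : Int), ?_, (j : Int), ?_, ?_, ?_⟩
    · rw [PySem.List.mem_pyRange_one]
      simp only [PySem.List.len_eq, hnk]
      exact ⟨by omega, by exact_mod_cast (by omega : i < L.length)⟩
    · rw [PySem.List.mem_pyRange_one]
      simp only [PySem.List.len_eq, hnk]
      exact ⟨by exact_mod_cast (by omega : i + 1 ≤ j), by exact_mod_cast hjL⟩
    · rw [pv_lookup_at L hk (i : Int) (by omega) (by exact_mod_cast (by omega : i < L.length))]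
      simpa using of_decide_eq_true hpi
    · rw [pv_lookup_at L hk (j : Int) (by omega) (by exact_mod_cast hjL)]
      simpa using of_decide_eq_true hpj

-- ===== VERDICT (by name: the statement is the Claim_ definition above) =====
theorem find_consensus_anomalies_py_spec : Claim_equal_find_consensus_anomalies_py := by
  intro L _ hpre
  obtain ⟨hk, hv⟩ := hpre
  unfold Spec_find_consensus_anomalies_py
  by_cases hlen : PySem.List.len L < 2
  · unfold find_consensus_anomalies_py find_consensus_anomalies_py_alt
    rw [if_pos hlen, if_pos hlen]
  · have hA : find_consensus_anomalies_py L
        = PySem.List.sorted (pvConsA L) (fun x => x) false := by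
      unfold find_consensus_anomalies_py pvConsA pvV
      rw [if_neg hlen]
    have hB : find_consensus_anomalies_py_alt L
        = PySem.List.sorted
            (((PySem.Dict.counter (L.flatMap Prod.snd)).items.filter
                (fun kc => decide (2 ≤ kc.2))).map Prod.fst) (fun x => x) false := by
      unfold find_consensus_anomalies_py_alt
      rw [if_neg hlen, pv_counts_eq_flat, PySem.Dict.foldl_insert_getD_add_one_eq_counter]
    rw [hA, hB, PySem.Dict.items_counter, List.filter_map, List.map_map]
    rw [show (Prod.fst ∘ fun k => (k, ((List.count k (L.flatMap Prod.snd)) : Int))) = id from rfl,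
        List.map_id]
    refine PySem.List.sorted_eq_sorted_of_perm _ _ _ (fun a b h => h) ?_
    refine (List.perm_ext_iff_of_nodup (pv_nodup_consA L) ((PySem.Set.nodup_ofList _).filter _)).2 ?_
    intro x
    rw [pv_consA_iff L hk x]
    simp only [List.mem_filter, PySem.Set.mem_ofList, Function.comp_apply]
    rw [← pv_count_flatMap L hv]
    constructor
    · intro h2
      exact ⟨List.count_pos_iff.1 (by omega), decide_eq_true (by exact_mod_cast h2)⟩
    · rintro ⟨_, h2⟩
      exact_mod_cast of_decide_eq_true h2
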